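-- pv_equiv track=rewrite | github.com/ninjanadya/CSCI-5481 | Homework 2/hw2.py | anchoredNW
-- ===== SOURCE A (Python) =====
-- match = 1
--
-- mismatch = -3
--
-- def anchoredNW(seq1, seq2): #hard coding the start and end times. they correspond to different sequences.
-- 	anchoredScore = 0
-- 	anchoredLen = len(seq1) #this is for the while loop to iterate through
-- 	i = 0
-- 	tempAlignment1 = ""
-- 	tempAlignment2 = ""
-- 	while i < anchoredLen:
-- 		if (seq1[i] == seq2[i]): # if i = 0, we begin at the start position for each sequence
-- 			anchoredScore+=match
-- 		else:
-- 			anchoredScore+=mismatch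
-- 		tempAlignment1 += seq1[i]
-- 		tempAlignment2 += seq2[i]
-- 		i+=1
-- 	return tempAlignment1, tempAlignment2, anchoredScore
-- ===== SOURCE B (Python) =====
-- match = 1
--
-- mismatch = -3
--
-- def anchoredNW(seq1, seq2):
--     score = sum(match if seq1[i] == seq2[i] else mismatch for i in range(len(seq1)))
--     return seq1, seq2[:len(seq1)], score
-- ===== Notes on version B (the rewrite author's own statement) =====
-- stated objective: faster
-- what changed: The character-by-character copy loop is replaced by closed-form results (seq1 itself and the slice seq2[:len(seq1)]), leaving only a single sum() pass for the score.
import Mathlib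
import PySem

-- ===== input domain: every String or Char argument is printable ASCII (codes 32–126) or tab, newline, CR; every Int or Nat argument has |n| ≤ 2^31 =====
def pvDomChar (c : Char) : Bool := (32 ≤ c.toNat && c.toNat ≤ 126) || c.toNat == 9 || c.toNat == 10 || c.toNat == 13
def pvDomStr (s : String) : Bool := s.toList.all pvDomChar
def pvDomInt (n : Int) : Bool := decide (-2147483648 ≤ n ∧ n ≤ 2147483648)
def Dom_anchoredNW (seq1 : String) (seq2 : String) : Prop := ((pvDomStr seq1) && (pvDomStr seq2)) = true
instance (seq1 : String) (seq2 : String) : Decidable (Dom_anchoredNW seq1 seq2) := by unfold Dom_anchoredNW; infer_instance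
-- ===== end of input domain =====

-- B replaces A's character-by-character copy loop with closed-form results (seq1 and the
-- slice seq2[:len(seq1)]) plus a single sum() pass for the score; same return value on Pre_.

-- ===== PORT A =====
-- A's while loop; i counts up, fuel = anchoredLen - i. Out-of-range seq2[i] is a Python
-- IndexError (excluded by Pre_); getD's default is never used inside Pre_.
def anchoredNWLoop (l1 l2 : List Char) : Nat → Nat → List Char → List Char → Int → List Char × List Char × Int
  | 0, _, a1, a2, s => (a1, a2, s)
  | Nat.succ m, i, a1, a2, s =>
      let c1 := l1.getD i ' '
      let c2 := l2.getD i ' '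
      let s' := if c1 == c2 then s + 1 else s + (-3)
      anchoredNWLoop l1 l2 m (i + 1) (a1 ++ [c1]) (a2 ++ [c2]) s'

def anchoredNW (seq1 : String) (seq2 : String) : String × String × Int :=
  let l1 := seq1.toList
  let l2 := seq2.toList
  let r := anchoredNWLoop l1 l2 l1.length 0 [] [] 0
  (String.ofList r.1, String.ofList r.2.1, r.2.2)

-- ===== PORT B =====
def anchoredNW_alt (seq1 : String) (seq2 : String) : String × String × Int :=
  let l1 := seq1.toList
  let l2 := seq2.toList
  let score := (List.range l1.length).foldl
    (fun acc i => acc + (if l1.getD i ' ' == l2.getD i ' ' then (1 : Int) else -3)) 0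
  (seq1, String.ofList (l2.take l1.length), score)

-- ===== PRECONDITION & SPEC =====
-- A (and B) raise IndexError on seq2[i] when seq2 is shorter than seq1.
def Pre_anchoredNW (seq1 : String) (seq2 : String) : Prop := seq1.length ≤ seq2.length
instance (seq1 : String) (seq2 : String) : Decidable (Pre_anchoredNW seq1 seq2) := by
  unfold Pre_anchoredNW; infer_instance
def pvWitness_anchoredNW : String × String := ("ACGT", "AGGTC")

def Spec_anchoredNW (seq1 : String) (seq2 : String) (out : String × String × Int) : Prop := out = anchoredNW_alt seq1 seq2
instance (seq1 : String) (seq2 : String) (out : String × String × Int) : Decidable (Spec_anchoredNW seq1 seq2 out) := by unfold Spec_anchoredNW; infer_instance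

-- ===== CLAIM (what is proved, stated in full; the proofs are below) =====
def Claim_equal_anchoredNW : Prop := ∀ (seq1 : String) (seq2 : String), Dom_anchoredNW seq1 seq2 → Pre_anchoredNW seq1 seq2 → Spec_anchoredNW seq1 seq2 (anchoredNW seq1 seq2)

-- ===== LEMMAS AND PROOFS =====

-- A's loop in closed form over the index range it visits.
theorem anchoredNWLoop_eq (l1 l2 : List Char) (n : Nat) :
    ∀ (i : Nat) (a1 a2 : List Char) (s : Int),
    anchoredNWLoop l1 l2 n i a1 a2 s =
      (a1 ++ (List.range' i n).map (fun j => l1.getD j ' '),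
       a2 ++ (List.range' i n).map (fun j => l2.getD j ' '),
       (List.range' i n).foldl
         (fun acc j => acc + (if l1.getD j ' ' == l2.getD j ' ' then (1 : Int) else -3)) s) := by
  induction n with
  | zero => intro i a1 a2 s; simp [anchoredNWLoop]
  | succ m ih =>
      intro i a1 a2 s
      rw [List.range'_succ]
      simp only [anchoredNWLoop, List.map_cons, List.foldl_cons, ih]
      split_ifs with h <;> simp [List.append_assoc]

theorem map_getD_range' (l : List Char) (n : Nat) (hn : n ≤ l.length) :
    (List.range' 0 n).map (fun j => l.getD j ' ') = l.take n := by
  apply List.ext_getElem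
  · simp [hn]
  · intro i h1 h2
    simp only [List.getElem_map, List.getElem_range', List.getElem_take]
    have h1' : i < n := by simpa using h1
    have hlt : i < l.length := lt_of_lt_of_le h1' hn
    simp [List.getD_eq_getElem?_getD, List.getElem?_eq_getElem hlt]

-- ===== VERDICT (by name: the statement is the Claim_ definition above) =====
theorem anchoredNW_spec : Claim_equal_anchoredNW := by
  intro seq1 seq2 _ hpre
  unfold Spec_anchoredNW anchoredNW anchoredNW_alt
  have hpre' : seq1.length ≤ seq2.length := hpre
  have hlen : seq1.toList.length ≤ seq2.toList.length := by
    simpa [String.length_toList] using hpre'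
  dsimp only
  rw [anchoredNWLoop_eq, List.range_eq_range',
      map_getD_range' seq1.toList _ le_rfl, map_getD_range' seq2.toList _ hlen,
      List.take_length]
  simp
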